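-- pv_equiv track=rewrite | github.com/aykinuz-stack/smartcampus-ai | views/book_pdf_engine.py | _collect_skills
-- ===== SOURCE A (Python) =====
-- def _collect_skills(weeks: list[dict]) -> dict:
--     """Merge skills from all weeks."""
--     merged: dict[str, list[str]] = {}
--     for w in weeks:
--         for k, v in w.get("skills", {}).items():
--             if k not in merged:
--                 merged[k] = []
--             if v and v not in merged[k]:
--                 merged[k].append(v)
--     return merged
-- ===== SOURCE B (Python) =====
-- def _collect_skills(weeks: list[dict]) -> dict:
--     """Merge skills from all weeks."""
--     pairs = [(k, v) for w in weeks for k, v in w.get("skills", {}).items()]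
--     return {k: [v for v in dict.fromkeys(v2 for k2, v2 in pairs if k2 == k) if v]
--             for k in dict.fromkeys(k for k, _ in pairs)}
-- ===== Notes on version B (the rewrite author's own statement) =====
-- stated objective: alternative
-- what changed: B flattens all weeks' skill pairs into one list, then builds the result as a group-by comprehension: the key order is an order-preserving dedup of the flattened keys, and each value list is a per-key scan of the flattened pairs deduplicated with dict.fromkeys and filtered for truthiness, replacing A's single pass with an incrementally mutated dict and inline membership tests.
import Mathlib
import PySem

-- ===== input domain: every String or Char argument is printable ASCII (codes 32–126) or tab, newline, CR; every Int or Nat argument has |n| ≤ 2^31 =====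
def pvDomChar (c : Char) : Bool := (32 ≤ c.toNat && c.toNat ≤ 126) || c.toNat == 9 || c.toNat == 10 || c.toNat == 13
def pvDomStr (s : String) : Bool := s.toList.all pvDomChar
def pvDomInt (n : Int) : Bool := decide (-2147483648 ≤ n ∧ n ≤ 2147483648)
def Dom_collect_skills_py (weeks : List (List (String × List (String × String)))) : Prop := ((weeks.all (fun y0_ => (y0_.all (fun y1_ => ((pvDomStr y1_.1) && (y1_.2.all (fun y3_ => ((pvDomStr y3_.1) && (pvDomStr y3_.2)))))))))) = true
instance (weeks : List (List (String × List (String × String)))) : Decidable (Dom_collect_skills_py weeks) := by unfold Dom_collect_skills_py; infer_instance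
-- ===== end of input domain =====

-- B flattens all weeks' skill pairs into one list and builds the result as a group-by
-- comprehension (deduped key order, per-key rescan + dedup + truthiness filter) instead of
-- A's single pass mutating a dict with inline membership tests; same cost class, no speed claim.

-- ===== PORT A =====
def collect_skills_py (weeks : List (List (String × List (String × String)))) : List (String × List String) :=
  (weeks.foldl
    (fun merged w =>
      (PySem.Dict.ofList ((PySem.Dict.ofList w).getD "skills" [])).items.foldl
        (fun merged kv =>
          let merged := if merged.contains kv.1 then merged else merged.insert kv.1 []
          if kv.2 != "" && !((merged.getD kv.1 []).contains kv.2) then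
            merged.modify kv.1 [] (fun vs => vs ++ [kv.2])
          else merged)
        merged)
    PySem.Dict.empty).items

-- ===== PORT B =====
def collect_skills_py_alt (weeks : List (List (String × List (String × String)))) : List (String × List String) :=
  let pairs := weeks.flatMap (fun w => (PySem.Dict.ofList ((PySem.Dict.ofList w).getD "skills" [])).items)
  (PySem.List.dedup (pairs.map (fun p => p.1))).map
    (fun k => (k, (PySem.List.dedup ((pairs.filter (fun p => p.1 == k)).map (fun p => p.2))).filter (fun v => v != "")))

-- ===== PRECONDITION & SPEC =====
def Spec_collect_skills_py (weeks : List (List (String × List (String × String)))) (out : List (String × List String)) : Prop := out = collect_skills_py_alt weeks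
instance (weeks : List (List (String × List (String × String)))) (out : List (String × List String)) : Decidable (Spec_collect_skills_py weeks out) := by unfold Spec_collect_skills_py; infer_instance

-- ===== CLAIM (what is proved, stated in full; the proofs are below) =====
def Claim_equal_collect_skills_py : Prop := ∀ (weeks : List (List (String × List (String × String)))), Dom_collect_skills_py weeks → Spec_collect_skills_py weeks (collect_skills_py weeks)

-- ===== LEMMAS AND PROOFS =====

-- A's inner loop body
def pvStepA (m : PySem.Dict String (List String)) (kv : String × String) : PySem.Dict String (List String) :=
  let m := if m.contains kv.1 then m else m.insert kv.1 []
  if kv.2 != "" && !((m.getD kv.1 []).contains kv.2) then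
    m.modify kv.1 [] (fun vs => vs ++ [kv.2])
  else m

-- the skill pairs contributed by one week
def pvSkills (w : List (String × List (String × String))) : List (String × String) :=
  (PySem.Dict.ofList ((PySem.Dict.ofList w).getD "skills" [])).items

-- B's per-key value list: dedup then drop falsy
def pvVal (vs : List String) : List String := (PySem.List.dedup vs).filter (fun v => v != "")

-- the raw values attached to key k in pair list P
def pvVals (P : List (String × String)) (k : String) : List String :=
  (P.filter (fun p => p.1 == k)).map (fun p => p.2)

-- B's result as a function of the flattened pair list
def pvG (P : List (String × String)) : List (String × List String) :=
  (PySem.List.dedup (P.map (fun p => p.1))).map (fun k => (k, pvVal (pvVals P k)))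

theorem pvA_eq (weeks : List (List (String × List (String × String)))) :
    collect_skills_py weeks = ((weeks.flatMap pvSkills).foldl pvStepA PySem.Dict.empty).items := by
  rw [List.foldl_flatMap]; rfl

theorem pvB_eq (weeks : List (List (String × List (String × String)))) :
    collect_skills_py_alt weeks = pvG (weeks.flatMap pvSkills) := rfl

theorem pv_contains_dedup (l : List String) (x : String) :
    (PySem.List.dedup l).contains x = l.contains x := by
  by_cases h : x ∈ l
  · simp [h]
  · simp [h]

theorem pv_dedup_snoc (l : List String) (x : String) :
    PySem.List.dedup (l ++ [x]) =
      if l.contains x then PySem.List.dedup l else PySem.List.dedup l ++ [x] := by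
  have : PySem.List.dedup (l ++ [x]) = PySem.Set.add (PySem.List.dedup l) x := by
    simp [PySem.List.dedup, PySem.Set.ofList_append, PySem.Set.update]
  rw [this, PySem.Set.add, PySem.Set.contains, pv_contains_dedup]

theorem pv_mem_pvVal (vs : List String) (v : String) :
    v ∈ pvVal vs ↔ v ∈ vs ∧ v ≠ "" := by
  simp [pvVal, List.mem_filter]

theorem pvVal_snoc_mem (vs : List String) (v : String) (h : v ∈ vs) :
    pvVal (vs ++ [v]) = pvVal vs := by
  unfold pvVal
  rw [pv_dedup_snoc, if_pos (by simpa using h)]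

theorem pvVal_snoc_new (vs : List String) (v : String) (h : v ∉ vs) :
    pvVal (vs ++ [v]) = pvVal vs ++ List.filter (fun x => x != "") [v] := by
  unfold pvVal
  rw [pv_dedup_snoc, if_neg (by simpa using h), List.filter_append]

theorem pvVal_nil : pvVal [] = [] := rfl

theorem pvVal_single (v : String) (hv : v ≠ "") : pvVal [v] = [v] := by
  have h0 := pvVal_snoc_new [] v (by simp)
  rw [List.nil_append] at h0
  rw [h0, pvVal_nil]
  simp [hv]

theorem pvVal_snoc_empty (vs : List String) : pvVal (vs ++ [""]) = pvVal vs := by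
  by_cases h : ("" : String) ∈ vs
  · exact pvVal_snoc_mem vs "" h
  · rw [pvVal_snoc_new vs "" h]; simp

theorem pvVals_snoc (P : List (String × String)) (kv : String × String) (k : String) :
    pvVals (P ++ [kv]) k = pvVals P k ++ (if kv.1 == k then [kv.2] else []) := by
  unfold pvVals
  rw [List.filter_append, List.map_append]
  by_cases h : kv.1 == k <;> simp [h]

theorem pvVals_nil (P : List (String × String)) (k : String)
    (h : k ∉ P.map (fun p => p.1)) : pvVals P k = [] := by
  unfold pvVals
  have hf : P.filter (fun p => p.1 == k) = [] := by
    rw [List.filter_eq_nil_iff]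
    intro p hp
    simp only [beq_iff_eq]
    intro hpk
    exact h (List.mem_map.2 ⟨p, hp, hpk⟩)
  rw [hf, List.map_nil]

-- find? for equality on a list of keys
theorem pv_find?_self (l : List String) (k : String) :
    l.find? (fun x => x == k) = if k ∈ l then some k else none := by
  induction l with
  | nil => simp
  | cons a l ih =>
      by_cases h : a = k
      · subst h; simp [List.find?]
      · rw [List.find?_cons_of_neg (by simp [h])]
        simp [ih, List.mem_cons, Ne.symm h]

theorem pv_get?_G (P : List (String × String)) (k : String) :
    (PySem.Dict.mk (pvG P) : PySem.Dict String (List String)).get? k =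
      if k ∈ P.map (fun p => p.1) then some (pvVal (pvVals P k)) else none := by
  unfold pvG
  simp only [PySem.Dict.get?, List.find?_map, Function.comp_def]
  rw [show (fun k' => ((k', pvVal (pvVals P k')) : String × List String).1 == k) = (fun k' => k' == k) from rfl]
  rw [pv_find?_self]
  by_cases h : k ∈ P.map (fun p => p.1)
  · rw [if_pos ((PySem.List.mem_dedup _ _).2 h), if_pos h]; rfl
  · rw [if_neg (fun h' => h ((PySem.List.mem_dedup _ _).1 h')), if_neg h]; rfl

theorem pv_getD_G (P : List (String × String)) (k : String) (h : k ∈ P.map (fun p => p.1)) :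
    (PySem.Dict.mk (pvG P) : PySem.Dict String (List String)).getD k [] = pvVal (pvVals P k) := by
  rw [PySem.Dict.getD, pv_get?_G, if_pos h]; rfl

theorem pv_contains_G (P : List (String × String)) (k : String) :
    (PySem.Dict.mk (pvG P) : PySem.Dict String (List String)).contains k =
      decide (k ∈ P.map (fun p => p.1)) := by
  unfold pvG
  simp only [PySem.Dict.contains, List.any_map, Function.comp_def]
  by_cases h : k ∈ P.map (fun p => p.1)
  · simp only [h, decide_true]
    rw [List.any_eq_true]
    refine ⟨k, ?_, ?_⟩
    · exact (PySem.List.mem_dedup _ _).2 h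
    · simp
  · simp only [h, decide_false]
    rw [List.any_eq_false]
    intro x hx
    simp only [beq_iff_eq]
    intro hxk
    exact h ((PySem.List.mem_dedup _ _).1 (hxk ▸ hx))

-- one step of A's loop, expressed on B's group-by form
theorem pv_step (P : List (String × String)) (kv : String × String) :
    pvStepA (PySem.Dict.mk (pvG P)) kv = PySem.Dict.mk (pvG (P ++ [kv])) := by
  by_cases hmem : kv.1 ∈ P.map (fun p => p.1)
  · -- key already present: dedup of keys unchanged
    have hkeys : PySem.List.dedup ((P ++ [kv]).map (fun p => p.1)) =
        PySem.List.dedup (P.map (fun p => p.1)) := by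
      rw [List.map_append, List.map_singleton, pv_dedup_snoc, if_pos (by simpa using hmem)]
    have hG : pvG (P ++ [kv]) = (PySem.List.dedup (P.map (fun p => p.1))).map
        (fun k => (k, pvVal (pvVals (P ++ [kv]) k))) := by
      unfold pvG; rw [hkeys]
    unfold pvStepA
    have hc : (PySem.Dict.mk (pvG P) : PySem.Dict String (List String)).contains kv.1 = true := by
      rw [pv_contains_G]; simp [hmem]
    rw [hc]
    simp only [reduceIte]
    rw [pv_getD_G _ _ hmem]
    by_cases hv : kv.2 = ""
    · rw [if_neg (by simp [hv])]
      apply PySem.Dict.ext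
      show pvG P = pvG (P ++ [kv])
      rw [hG]
      unfold pvG
      apply List.map_congr_left
      intro k _
      rw [pvVals_snoc]
      by_cases hk : kv.1 == k
      · simp only [hk, if_pos]; rw [hv, pvVal_snoc_empty]
      · simp [hk]
    · by_cases hin : kv.2 ∈ pvVals P kv.1
      · have : kv.2 ∈ pvVal (pvVals P kv.1) := (pv_mem_pvVal _ _).2 ⟨hin, hv⟩
        rw [if_neg (by simp [this])]
        apply PySem.Dict.ext
        show pvG P = pvG (P ++ [kv])
        rw [hG]
        unfold pvG
        apply List.map_congr_left
        intro k _
        rw [pvVals_snoc]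
        by_cases hk : kv.1 == k
        · have hk' : kv.1 = k := by simpa using hk
          subst hk'
          simp only [hk, if_pos]
          rw [pvVal_snoc_mem _ _ hin]
        · simp [hk]
      · have hnot : kv.2 ∉ pvVal (pvVals P kv.1) := fun h => hin ((pv_mem_pvVal _ _).1 h).1
        rw [if_pos (by simp [hv, hnot])]
        rw [PySem.Dict.modify, pv_getD_G _ _ hmem]
        apply PySem.Dict.ext
        rw [PySem.Dict.items_insert_of_contains _ _ (by rw [pv_contains_G]; simpa using hmem)]
        show (pvG P).map _ = pvG (P ++ [kv])
        rw [hG]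
        unfold pvG
        rw [List.map_map]
        apply List.map_congr_left
        intro k _
        rw [pvVals_snoc]
        by_cases hk : kv.1 == k
        · have hk' : kv.1 = k := by simpa using hk
          subst hk'
          simp only [hk, if_pos, Function.comp_def]
          rw [pvVal_snoc_new _ _ hin]
          simp [hv]
        · have hk' : k ≠ kv.1 := by
            simp only [beq_iff_eq] at hk; exact fun h => hk h.symm
          simp [hk, hk']
  · -- new key: an empty list is appended, then possibly filled
    have hcontains : (PySem.Dict.mk (pvG P) : PySem.Dict String (List String)).contains kv.1 = false := by
      rw [pv_contains_G]; simpa using hmem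
    have hkeys : PySem.List.dedup ((P ++ [kv]).map (fun p => p.1)) =
        PySem.List.dedup (P.map (fun p => p.1)) ++ [kv.1] := by
      rw [List.map_append, List.map_singleton, pv_dedup_snoc, if_neg (by simpa using hmem)]
    have hvals1 : pvVals (P ++ [kv]) kv.1 = [kv.2] := by
      rw [pvVals_snoc, pvVals_nil P kv.1 hmem]; simp
    have hGsnoc : pvG (P ++ [kv]) = pvG P ++ [(kv.1, pvVal [kv.2])] := by
      unfold pvG
      rw [hkeys, List.map_append, List.map_singleton, hvals1]
      congr 1
      apply List.map_congr_left
      intro k hkmem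
      rw [pvVals_snoc]
      have hk : ¬ (kv.1 == k) := by
        simp only [beq_iff_eq]
        intro h
        exact hmem (h ▸ (PySem.List.mem_dedup _ _).1 hkmem)
      simp [hk]
    have hitems1 : ((PySem.Dict.mk (pvG P) : PySem.Dict String (List String)).insert kv.1 []).items
        = pvG P ++ [(kv.1, [])] := PySem.Dict.items_insert_of_not_contains _ _ hcontains
    unfold pvStepA
    rw [hcontains]
    simp only [Bool.false_eq_true, if_false]
    set d' := (PySem.Dict.mk (pvG P) : PySem.Dict String (List String)).insert kv.1 [] with hd'
    have hd'items : d'.items = pvG P ++ [(kv.1, [])] := hitems1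
    have hd'get : d'.get? kv.1 = some [] := by
      show (d'.items.find? (fun p => p.1 == kv.1)).map (fun p => p.2) = some []
      rw [hd'items, List.find?_append]
      have h1 : (pvG P).find? (fun p => p.1 == kv.1) = none := by
        have := pv_get?_G P kv.1
        rw [if_neg hmem] at this
        simpa [PySem.Dict.get?, Option.map_eq_none_iff] using this
      rw [h1]
      simp [List.find?]
    have hd'getD : d'.getD kv.1 [] = [] := by rw [PySem.Dict.getD, hd'get]; rfl
    rw [hd'getD]
    simp only [List.contains_nil, Bool.not_false, Bool.and_true]
    by_cases hv : kv.2 = ""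
    · rw [if_neg (by simp [hv])]
      apply PySem.Dict.ext
      rw [hd'items, hGsnoc, hv]
      simp [pvVal]
    · rw [if_pos (by simp [hv])]
      rw [PySem.Dict.modify, hd'getD]
      apply PySem.Dict.ext
      rw [PySem.Dict.items_insert_of_contains _ _ (by rw [hd', PySem.Dict.contains_insert_self]),
        hd'items, List.map_append, hGsnoc]
      congr 1
      · refine (List.map_congr_left ?_).trans (List.map_id _)
        intro p hp
        have hk : ¬ (p.1 == kv.1) := by
          simp only [beq_iff_eq]
          intro h
          apply hmem
          rcases List.mem_map.1 (show p ∈ (PySem.List.dedup (P.map (fun q => q.1))).map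
              (fun k => (k, pvVal (pvVals P k))) from hp) with ⟨k, hkmem, hpk⟩
          rw [← h, ← hpk]
          exact (PySem.List.mem_dedup _ _).1 hkmem
        simp [hk]
      · rw [pvVal_single kv.2 hv]
        simp

theorem pv_fold (P : List (String × String)) :
    P.foldl pvStepA PySem.Dict.empty = PySem.Dict.mk (pvG P) := by
  induction P using List.reverseRecOn with
  | nil => rfl
  | append_singleton P kv ih =>
      rw [List.foldl_append, List.foldl_cons, List.foldl_nil, ih, pv_step]

-- ===== VERDICT (by name: the statement is the Claim_ definition above) =====
theorem collect_skills_py_spec : Claim_equal_collect_skills_py := by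
  intro weeks _
  unfold Spec_collect_skills_py
  rw [pvA_eq, pvB_eq, pv_fold]
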